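-- pv_equiv track=rewrite | github.com/defnecolak/sanalmulakatim | backend/db_migrate.py | _pg_split_sql
-- ===== SOURCE A (Python) =====
-- def _pg_split_sql(sql: str) -> list[str]:
--     """Very small SQL splitter.
--
--     Good enough for our migration style (mostly CREATE TABLE/INDEX, ALTER TABLE).
--     Avoids splitting on comment-only lines.
--     """
--     lines: list[str] = []
--     for ln in (sql or "").splitlines():
--         s = ln.strip()
--         if s.startswith("--"):
--             continue
--         lines.append(ln)
--     cleaned = "\n".join(lines)
--     parts = [p.strip() for p in cleaned.split(";")]
--     return [p + ";" for p in parts if p.strip()]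
-- ===== SOURCE B (Python) =====
-- def _pg_split_sql(sql: str) -> list[str]:
--     """Streaming splitter: one pass over the lines, never builds the joined blob."""
--     out: list[str] = []
--     buf = ""
--     first = True
--     for ln in (sql or "").splitlines():
--         if ln.strip().startswith("--"):
--             continue
--         pieces = (("" if first else "\n") + ln).split(";")
--         first = False
--         for head in pieces[:-1]:
--             buf += head
--             p = buf.strip()
--             if p:
--                 out.append(p + ";")
--             buf = ""
--         buf += pieces[-1]
--     p = buf.strip()
--     if p:
--         out.append(p + ";")
--     return out
-- ===== Notes on version B (the rewrite author's own statement) =====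
-- stated objective: alternative
-- what changed: B replaces A's four-phase pipeline (filter comment lines, join them into one blob, split the blob on semicolons, strip and re-suffix) by a single streaming pass that keeps a running buffer per line and emits each statement as soon as a semicolon closes it, never building the joined blob.
import Mathlib
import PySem

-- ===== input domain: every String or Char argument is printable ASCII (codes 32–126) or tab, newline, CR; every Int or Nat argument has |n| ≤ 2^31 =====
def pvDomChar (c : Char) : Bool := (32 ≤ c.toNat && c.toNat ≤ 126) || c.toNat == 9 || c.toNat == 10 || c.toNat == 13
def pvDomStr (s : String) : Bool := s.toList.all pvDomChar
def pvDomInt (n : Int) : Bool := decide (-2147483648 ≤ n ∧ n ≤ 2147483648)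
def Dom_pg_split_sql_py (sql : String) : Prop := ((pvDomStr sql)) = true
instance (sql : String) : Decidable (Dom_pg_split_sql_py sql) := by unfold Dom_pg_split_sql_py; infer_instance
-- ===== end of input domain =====

-- B is a single streaming pass over the lines (emitting a statement as soon as a semicolon
-- closes it) instead of A's filter-join-split-strip pipeline; objective: alternative decomposition.

-- ===== PORT A =====
-- literal transliteration of A on List Char (PySem.Str.* are thin wrappers over PySem.Chars.*)
def pgACore (s : List Char) : List (List Char) :=
  let base := if s = [] then [] else s      -- (sql or "")
  let lines := (PySem.Chars.splitlines base).foldl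
    (fun (acc : List (List Char)) ln =>
      if PySem.Chars.startswith (PySem.Chars.strip ln) ['-', '-'] then acc else acc ++ [ln]) []
  let cleaned := PySem.Chars.join ['\n'] lines
  let parts := (PySem.Chars.splitOn cleaned [';']).map PySem.Chars.strip
  (parts.filter (fun p => PySem.Chars.strip p != [])).map (fun p => p ++ [';'])

def pg_split_sql_py (sql : String) : List String :=
  (pgACore sql.toList).map String.ofList

-- ===== PORT B =====
-- body of Source B's inner loop: `buf += head; p = buf.strip(); if p: out.append(p + ";"); buf = ""`
def pgInner (ob : List (List Char) × List Char) (head : List Char) :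
    List (List Char) × List Char :=
  let buf := ob.2 ++ head
  let p := PySem.Chars.strip buf
  (if p ≠ [] then ob.1 ++ [p ++ [';']] else ob.1, [])

-- one iteration of Source B's line loop over the state (out, buf, first)
def pgBStep (st : List (List Char) × List Char × Bool) (ln : List Char) :
    List (List Char) × List Char × Bool :=
  if PySem.Chars.startswith (PySem.Chars.strip ln) ['-', '-'] then st
  else
    let pieces := PySem.Chars.splitOn ((if st.2.2 then [] else ['\n']) ++ ln) [';']
    let ob := pieces.dropLast.foldl pgInner (st.1, st.2.1)
    (ob.1, ob.2 ++ pieces.getLastD [], false)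

def pgBCore (s : List Char) : List (List Char) :=
  let base := if s = [] then [] else s      -- (sql or "")
  let st := (PySem.Chars.splitlines base).foldl pgBStep ([], [], true)
  let p := PySem.Chars.strip st.2.1
  if p ≠ [] then st.1 ++ [p ++ [';']] else st.1

def pg_split_sql_py_alt (sql : String) : List String :=
  (pgBCore sql.toList).map String.ofList

-- ===== PRECONDITION & SPEC =====
def Spec_pg_split_sql_py (sql : String) (out : List String) : Prop := out = pg_split_sql_py_alt sql
instance (sql : String) (out : List String) : Decidable (Spec_pg_split_sql_py sql out) := by unfold Spec_pg_split_sql_py; infer_instance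

-- ===== CLAIM (what is proved, stated in full; the proofs are below) =====
def Claim_equal_pg_split_sql_py : Prop := ∀ (sql : String), Dom_pg_split_sql_py sql → Spec_pg_split_sql_py sql (pg_split_sql_py sql)

-- ===== LEMMAS AND PROOFS =====

-- proof-side model of splitting on a single ';'
def split1 : List Char → List (List Char)
  | [] => [[]]
  | c :: s => if c = ';' then [] :: split1 s else (split1 s).modifyHead (c :: ·)

def pgKeep (ln : List Char) : Bool :=
  !(PySem.Chars.startswith (PySem.Chars.strip ln) ['-', '-'])

-- what gets emitted for a list of ';'-free pieces
def pgEmit : List (List Char) → List (List Char)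
  | [] => []
  | q :: qs =>
      (if PySem.Chars.strip q ≠ [] then [PySem.Chars.strip q ++ [';']] else []) ++ pgEmit qs

-- processing one chunk of kept text (Source B's per-line work, after the first-flag prefixing)
def pgChunk (ob : List (List Char) × List Char) (chunk : List Char) :
    List (List Char) × List Char :=
  let pieces := split1 chunk
  let ob' := pieces.dropLast.foldl pgInner ob
  (ob'.1, ob'.2 ++ pieces.getLastD [])

-- ---- split1 ----
theorem split1_ne_nil (s : List Char) : split1 s ≠ [] := by
  induction s with
  | nil => simp [split1]
  | cons c s ih =>
    simp only [split1]; split_ifs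
    · simp
    · cases h : split1 s with
      | nil => exact absurd h ih
      | cons a t => simp

theorem split1_no_semi (s : List Char) : ∀ p ∈ split1 s, ';' ∉ p := by
  induction s with
  | nil => simp [split1]
  | cons c s ih =>
    simp only [split1]
    split_ifs with hc
    · intro p hp
      rcases List.mem_cons.mp hp with h | h
      · simp [h]
      · exact ih p h
    · cases h : split1 s with
      | nil => exact absurd h (split1_ne_nil s)
      | cons a t =>
        intro p hp
        rcases List.mem_cons.mp hp with h' | h'
        · subst h'
          have := ih a (by simp [h])
          simp [this]
          intro hx; exact absurd hx.symm hc
        · exact ih p (by simp [h, h'])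

theorem split1_of_no_semi (s : List Char) (h : ';' ∉ s) : split1 s = [s] := by
  induction s with
  | nil => simp [split1]
  | cons c s ih =>
    have hc : c ≠ ';' := by intro e; exact h (by simp [e])
    have hs : ';' ∉ s := fun hx => h (by simp [hx])
    simp [split1, hc, ih hs]

theorem split1_append (x y : List Char) :
    split1 (x ++ y) = (split1 x).dropLast ++ (split1 y).modifyHead ((split1 x).getLastD [] ++ ·) := by
  induction x with
  | nil =>
    cases h : split1 y with
    | nil => exact absurd h (split1_ne_nil y)
    | cons a t => simp [split1, h]
  | cons c x ih =>
    simp only [List.cons_append, split1]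
    split_ifs with hc
    · rw [ih]
      cases h : split1 x with
      | nil => exact absurd h (split1_ne_nil x)
      | cons a t => cases t with
        | nil => simp
        | cons b t' => simp
    · rw [ih]
      cases h : split1 x with
      | nil => exact absurd h (split1_ne_nil x)
      | cons a t =>
        cases t with
        | nil =>
          cases hy : split1 y with
          | nil => exact absurd hy (split1_ne_nil y)
          | cons b u => simp
        | cons b t' => simp

theorem go_semi (fuel : Nat) : ∀ (l cur : List Char) (accs : List (List Char)),
    l.length ≤ fuel →
    PySem.Chars.splitOn.go [';'] fuel l cur accs =
      accs.reverse ++ (split1 l).modifyHead (cur.reverse ++ ·) := by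
  induction fuel with
  | zero =>
    intro l cur accs hl
    have : l = [] := by cases l <;> simp_all
    subst this
    simp [PySem.Chars.splitOn.go, split1]
  | succ n ih =>
    intro l cur accs hl
    cases l with
    | nil => simp [PySem.Chars.splitOn.go, split1]
    | cons c rest =>
      rw [PySem.Chars.splitOn.go]
      by_cases hc : c = ';'
      · subst hc
        have hpre : ([';'] : List Char).isPrefixOf (';' :: rest) = true := by simp [List.isPrefixOf]
        rw [if_pos hpre]
        simp only [List.length_cons, List.length_nil, List.drop_succ_cons, List.drop_zero]
        rw [ih rest [] (cur.reverse :: accs) (by simpa using Nat.le_of_succ_le_succ hl)]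
        simp [split1]
        cases split1 rest <;> simp
      · have hpre : ([';'] : List Char).isPrefixOf (c :: rest) = false := by
          simp [List.isPrefixOf]; exact fun h => absurd h.symm hc
        rw [if_neg (by simp [hpre])]
        rw [ih rest (c :: cur) accs (by simpa using Nat.le_of_succ_le_succ hl)]
        simp only [split1, if_neg hc]
        cases h : split1 rest with
        | nil => exact absurd h (split1_ne_nil rest)
        | cons a t => simp

theorem splitOn_semi (s : List Char) : PySem.Chars.splitOn s [';'] = split1 s := by
  rw [PySem.Chars.splitOn, go_semi (s.length + 1) s [] [] (by omega)]
  cases h : split1 s with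
  | nil => exact absurd h (split1_ne_nil s)
  | cons a t => simp

-- ---- strip is idempotent ----
theorem head?_dropWhile_not (p : Char → Bool) (l : List Char) (b : Char)
    (h : b ∈ (l.dropWhile p).head?) : p b = false := by
  induction l with
  | nil => simp [List.dropWhile] at h
  | cons a u ih =>
    rw [List.dropWhile_cons] at h
    split_ifs at h with hp
    · exact ih h
    · simp at h; subst h; simpa using hp

theorem rstrip_idem (t : List Char) :
    PySem.Chars.rstrip (PySem.Chars.rstrip t) = PySem.Chars.rstrip t := by
  simp [PySem.Chars.rstrip, List.dropWhile_idempotent]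

theorem rstrip_prefix (t : List Char) : PySem.Chars.rstrip t <+: t := by
  simp only [PySem.Chars.rstrip]
  have h2 : (List.dropWhile PySem.Chars.isspace t.reverse).reverse <+: t.reverse.reverse :=
    List.reverse_prefix.mpr (List.dropWhile_suffix (p := PySem.Chars.isspace))
  simpa using h2

theorem lstrip_of_head?_not (t : List Char)
    (h : ∀ b ∈ t.head?, PySem.Chars.isspace b = false) : PySem.Chars.lstrip t = t := by
  cases t with
  | nil => rfl
  | cons a u =>
    have ha := h a (by simp)
    simp [PySem.Chars.lstrip, ha]

theorem lstrip_rstrip_lstrip (s : List Char) :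
    PySem.Chars.lstrip (PySem.Chars.rstrip (PySem.Chars.lstrip s)) =
      PySem.Chars.rstrip (PySem.Chars.lstrip s) := by
  apply lstrip_of_head?_not
  intro b hb
  obtain ⟨r, hr⟩ := rstrip_prefix (PySem.Chars.lstrip s)
  cases hc : PySem.Chars.rstrip (PySem.Chars.lstrip s) with
  | nil => rw [hc] at hb; simp at hb
  | cons b' w =>
    rw [hc] at hb hr
    simp at hb
    have : (PySem.Chars.lstrip s).head? = some b := by rw [← hr]; simp [hb]
    exact head?_dropWhile_not PySem.Chars.isspace s b (by simpa [PySem.Chars.lstrip] using this)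

theorem strip_strip (s : List Char) :
    PySem.Chars.strip (PySem.Chars.strip s) = PySem.Chars.strip s := by
  simp only [PySem.Chars.strip]
  rw [lstrip_rstrip_lstrip, rstrip_idem]

-- ---- pgEmit ----
theorem pgEmit_append (a b : List (List Char)) : pgEmit (a ++ b) = pgEmit a ++ pgEmit b := by
  induction a with
  | nil => simp [pgEmit]
  | cons q a ih => simp [pgEmit, ih]

theorem pgEmit_eq_filter_map (qs : List (List Char)) :
    pgEmit qs = (qs.filter (fun q => PySem.Chars.strip q != [])).map
      (fun q => PySem.Chars.strip q ++ [';']) := by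
  induction qs with
  | nil => simp [pgEmit]
  | cons q qs ih =>
    by_cases h : PySem.Chars.strip q = []
    · simp [pgEmit, h, ih]
    · simp [pgEmit, h, ih]

-- ---- the streaming pass computes split-then-emit ----
theorem pgInner_step (out : List (List Char)) (buf h : List Char) :
    pgInner (out, buf) h = (out ++ pgEmit [buf ++ h], []) := by
  simp only [pgInner, pgEmit]
  split_ifs <;> simp

theorem pgInner_fold (xs : List (List Char)) : ∀ out : List (List Char),
    xs.foldl pgInner (out, ([] : List Char)) = (out ++ pgEmit xs, []) := by
  induction xs with
  | nil => intro out; simp [pgEmit]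
  | cons x xs ih =>
    intro out
    rw [List.foldl_cons, pgInner_step]
    rw [ih]
    simp [pgEmit]

theorem getLastD_concat' (L : List (List Char)) (b d : List Char) :
    (L ++ [b]).getLastD d = b := by
  simp [List.getLastD_eq_getLast?]

theorem pgChunk_spec (chunk : List Char) (out : List (List Char)) (buf : List Char)
    (hbuf : ';' ∉ buf) :
    pgChunk (out, buf) chunk =
      (out ++ pgEmit ((split1 (buf ++ chunk)).dropLast), (split1 (buf ++ chunk)).getLastD []) := by
  have hsplit : split1 (buf ++ chunk) = (split1 chunk).modifyHead (buf ++ ·) := by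
    rw [split1_append, split1_of_no_semi buf hbuf]
    simp
  rcases List.eq_nil_or_concat (split1 chunk) with h | ⟨L, b, h⟩
  · exact absurd h (split1_ne_nil chunk)
  · cases L with
    | nil =>
      simp only [h] at hsplit
      simp [pgChunk, h, hsplit, pgEmit]
    | cons hd t =>
      rw [List.concat_eq_append] at h
      have hsp : split1 (buf ++ chunk) = (buf ++ hd) :: (t ++ [b]) := by
        rw [hsplit, h]; simp
      have hdl : (hd :: (t ++ [b])).dropLast = hd :: t := by
        rw [← List.cons_append, List.dropLast_concat]
      have hdl2 : ((buf ++ hd) :: (t ++ [b])).dropLast = (buf ++ hd) :: t := by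
        rw [← List.cons_append, List.dropLast_concat]
      have hgl : ((buf ++ hd) :: (t ++ [b])).getLastD ([] : List Char) = b := by
        rw [← List.cons_append]; exact getLastD_concat' _ _ _
      have hgl2 : (hd :: (t ++ [b])).getLastD ([] : List Char) = b := by
        rw [← List.cons_append]; exact getLastD_concat' _ _ _
      simp only [pgChunk, h, List.cons_append] at *
      rw [hsp, hdl, hdl2, hgl, hgl2, List.foldl_cons, pgInner_step, pgInner_fold]
      simp [pgEmit]

theorem getLastD_no_semi (x : List Char) : ';' ∉ (split1 x).getLastD [] := by
  rcases List.eq_nil_or_concat (split1 x) with h | ⟨L, b, h⟩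
  · exact absurd h (split1_ne_nil x)
  · rw [List.concat_eq_append] at h
    rw [h, getLastD_concat']
    exact split1_no_semi x b (by simp [h])

theorem pgFold_spec (chunks : List (List Char)) : ∀ (out : List (List Char)) (buf : List Char),
    ';' ∉ buf →
    chunks.foldl pgChunk (out, buf) =
      (out ++ pgEmit ((split1 (buf ++ chunks.flatten)).dropLast),
        (split1 (buf ++ chunks.flatten)).getLastD []) := by
  induction chunks with
  | nil =>
    intro out buf hbuf
    simp [split1_of_no_semi buf hbuf, pgEmit]
  | cons c cs ih =>
    intro out buf hbuf
    rw [List.foldl_cons, pgChunk_spec c out buf hbuf]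
    rw [ih _ _ (getLastD_no_semi (buf ++ c))]
    have hdecomp : split1 (buf ++ (c :: cs).flatten) =
        (split1 (buf ++ c)).dropLast ++ split1 ((split1 (buf ++ c)).getLastD [] ++ cs.flatten) := by
      rw [List.flatten_cons, ← List.append_assoc, split1_append]
      rw [split1_append ((split1 (buf ++ c)).getLastD [] ) cs.flatten,
        split1_of_no_semi _ (getLastD_no_semi (buf ++ c))]
      simp
    rw [hdecomp]
    have hne : split1 ((split1 (buf ++ c)).getLastD [] ++ cs.flatten) ≠ [] := split1_ne_nil _
    rw [List.dropLast_append_of_ne_nil hne]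
    rw [pgEmit_append]
    simp only [Prod.mk.injEq]
    refine ⟨by simp, ?_⟩
    rcases List.eq_nil_or_concat (split1 ((split1 (buf ++ c)).getLastD [] ++ cs.flatten)) with h | ⟨L, b, h⟩
    · exact absurd h hne
    · rw [List.concat_eq_append] at h
      rw [h, ← List.append_assoc, getLastD_concat', getLastD_concat']

-- ---- relating pgBStep to pgChunk ----
theorem pgBStep_skip (st : List (List Char) × List Char × Bool) (ln : List Char)
    (h : pgKeep ln = false) : pgBStep st ln = st := by
  simp only [pgKeep, Bool.not_eq_false'] at h
  simp [pgBStep, h]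

theorem pgBStep_first (out : List (List Char)) (buf ln : List Char) (h : pgKeep ln = true) :
    pgBStep (out, buf, true) ln =
      ((pgChunk (out, buf) ln).1, (pgChunk (out, buf) ln).2, false) := by
  simp only [pgKeep, Bool.not_eq_true'] at h
  simp [pgBStep, h, pgChunk, splitOn_semi]

theorem pgBStep_rest (out : List (List Char)) (buf ln : List Char) (h : pgKeep ln = true) :
    pgBStep (out, buf, false) ln =
      ((pgChunk (out, buf) ('\n' :: ln)).1, (pgChunk (out, buf) ('\n' :: ln)).2, false) := by
  simp only [pgKeep, Bool.not_eq_true'] at h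
  simp [pgBStep, h, pgChunk, splitOn_semi]

theorem pgBFold_filter (ls : List (List Char)) : ∀ st,
    ls.foldl pgBStep st = (ls.filter pgKeep).foldl pgBStep st := by
  induction ls with
  | nil => intro st; rfl
  | cons l ls ih =>
    intro st
    by_cases h : pgKeep l = true
    · simp [h, ih]
    · have := pgBStep_skip st l (by simpa using h)
      simp [h, this, ih]

theorem pgBFold_rest (ks : List (List Char)) : ∀ (out : List (List Char)) (buf : List Char),
    (∀ l ∈ ks, pgKeep l = true) →
    ks.foldl pgBStep (out, buf, false) =
      (((ks.map (fun l => '\n' :: l)).foldl pgChunk (out, buf)).1,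
        ((ks.map (fun l => '\n' :: l)).foldl pgChunk (out, buf)).2, false) := by
  induction ks with
  | nil => intro out buf _; rfl
  | cons k ks ih =>
    intro out buf hall
    rw [List.foldl_cons, pgBStep_rest out buf k (hall k (by simp))]
    rw [ih _ _ (fun l hl => hall l (by simp [hl]))]
    simp

-- kept lines joined: flatten of the prefixed chunks is the '\n'-join
theorem intercalate_nl (ks : List (List Char)) : ∀ (k : List Char),
    k ++ (ks.map (fun l => '\n' :: l)).flatten = List.intercalate ['\n'] (k :: ks) := by
  induction ks with
  | nil => intro k; simp [List.intercalate]
  | cons b t ih =>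
    intro k
    rw [List.map_cons, List.flatten_cons]
    have h2 := ih b
    simp only [List.intercalate] at *
    rw [List.intersperse_cons₂]
    simp only [List.flatten_cons]
    rw [← h2]
    simp

theorem pgCore_eq (s : List Char) : pgACore s = pgBCore s := by
  have hbase : (if s = [] then ([] : List Char) else s) = s := by split <;> simp_all
  simp only [pgACore, pgBCore, hbase]
  -- A side: the comment filter
  have hfoldA : ∀ (ls : List (List Char)),
      ls.foldl (fun (acc : List (List Char)) ln =>
        if PySem.Chars.startswith (PySem.Chars.strip ln) ['-', '-'] then acc else acc ++ [ln]) [] =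
      ls.filter pgKeep := by
    intro ls
    have : (fun (acc : List (List Char)) ln =>
        if PySem.Chars.startswith (PySem.Chars.strip ln) ['-', '-'] then acc else acc ++ [ln]) =
        (fun (acc : List (List Char)) ln => if pgKeep ln then acc ++ [id ln] else acc) := by
      funext acc ln
      simp only [pgKeep, id]
      cases PySem.Chars.startswith (PySem.Chars.strip ln) ['-', '-'] <;> simp
    rw [this, PySem.List.foldl_append_if pgKeep id ls []]
    simp
  rw [hfoldA, pgBFold_filter]
  set kept := (PySem.Chars.splitlines s).filter pgKeep with hkept
  have hall : ∀ l ∈ kept, pgKeep l = true := fun l hl => List.of_mem_filter hl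
  clear hkept
  revert hall
  -- A's value in pgEmit form
  have hA : ∀ cl : List Char,
      (((PySem.Chars.splitOn cl [';']).map PySem.Chars.strip).filter
          (fun p => PySem.Chars.strip p != [])).map (fun p => p ++ [';']) =
        pgEmit (split1 cl) := by
    intro cl
    rw [splitOn_semi, pgEmit_eq_filter_map, List.filter_map, List.map_map]
    congr 1
    · congr 1
      funext q
      simp [strip_strip]
  rw [hA]
  cases kept with
  | nil =>
    intro _
    simp [PySem.Chars.join, List.intercalate, split1, pgEmit, PySem.Chars.strip,
      PySem.Chars.lstrip, PySem.Chars.rstrip]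
  | cons k ks =>
    intro hall
    rw [List.foldl_cons, pgBStep_first _ _ k (hall k (by exact List.mem_cons_self ..))]
    rw [pgBFold_rest ks _ _ (fun l hl => hall l (List.mem_cons_of_mem _ hl))]
    have hchain : (k :: ks.map (fun l => '\n' :: l)).foldl pgChunk ([], []) =
        ((ks.map (fun l => '\n' :: l)).foldl pgChunk (pgChunk ([], []) k)) := by
      simp
    rw [show pgChunk (([] : List (List Char)), ([] : List Char)) k =
        ((pgChunk ([], []) k).1, (pgChunk ([], []) k).2) from rfl] at hchain
    have hfold := pgFold_spec (k :: ks.map (fun l => '\n' :: l)) [] [] (by simp)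
    rw [hchain] at hfold
    rw [hfold]
    have hflat : ([] : List Char) ++ (k :: ks.map (fun l => '\n' :: l)).flatten =
        List.intercalate ['\n'] (k :: ks) := by
      rw [List.nil_append, List.flatten_cons]
      exact intercalate_nl ks k
    rw [hflat]
    have hjoin : PySem.Chars.join ['\n'] (k :: ks) = List.intercalate ['\n'] (k :: ks) := rfl
    rw [hjoin]
    set ps := split1 (List.intercalate ['\n'] (k :: ks)) with hps
    rcases List.eq_nil_or_concat ps with h | ⟨L, b, h⟩
    · exact absurd h (split1_ne_nil _)
    · rw [List.concat_eq_append] at h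
      rw [h, List.dropLast_concat, getLastD_concat', pgEmit_append]
      simp only [pgEmit]
      split_ifs <;> simp

-- ===== VERDICT (by name: the statement is the Claim_ definition above) =====
theorem pg_split_sql_py_spec : Claim_equal_pg_split_sql_py := by
  intro sql _
  unfold Spec_pg_split_sql_py pg_split_sql_py pg_split_sql_py_alt
  rw [pgCore_eq]
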